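-- pv_equiv track=rewrite | github.com/uhuohuy/GazPNE2 | core.py | align_adv
-- ===== SOURCE A (Python) =====
-- def findall(p, s):
--     '''Yields all the positions of the pattern p in the string s.
--     Based on AkiRoss answer @ http://stackoverflow.com/questions/4664850'''
--
--     i = s.find(p)
--     while i != -1:
--         yield i
--         i = s.find(p, i + 1)
--
-- def align_adv(raw_tokens, raw_string):
--     tokens = list()
--
--     last_index = 0
--
--     for token in raw_tokens:
--         matches = [(raw_string[i:len(token[0]) + i], i, len(token[0]) + i - 1,token[1])
--                    for i in findall(token[0], raw_string)]
--
--         for match in matches: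
--             if match[1] >= last_index:
--                 last_index = match[2]
--                 tokens.append(match)
--                 break
--
--     return tokens
-- ===== SOURCE B (Python) =====
-- def _bisect_left(a, x):
--     lo, hi = 0, len(a)
--     while lo < hi:
--         mid = (lo + hi) // 2
--         if a[mid] < x:
--             lo = mid + 1
--         else:
--             hi = mid
--     return lo
--
--
-- def align_adv(raw_tokens, raw_string):
--     # Build once: each distinct token string -> sorted list of all its
--     # (overlapping) start positions in raw_string.
--     index = {}
--     for token in raw_tokens:
--         p = token[0]
--         if p not in index:
--             positions = []
--             i = raw_string.find(p)
--             while i != -1: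
--                 positions.append(i)
--                 i = raw_string.find(p, i + 1)
--             index[p] = positions
--     tokens = []
--     last_index = 0
--     for token in raw_tokens:
--         pos = index[token[0]]
--         j = _bisect_left(pos, last_index)
--         if j < len(pos):
--             start = pos[j]
--             end = start + len(token[0]) - 1
--             tokens.append((raw_string[start:start + len(token[0])], start, end, token[1]))
--             last_index = end
--     return tokens
-- ===== Notes on version B (the rewrite author's own statement) =====
-- stated objective: faster
-- what changed: B precomputes a dict mapping each distinct token string to the sorted list of all its start positions (one find-scan per distinct token) and then picks each token's first admissible position with a binary search (bisect_left) on that list, instead of A's full re-scan of raw_string plus linear first-match loop for every token occurrence.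
import Mathlib
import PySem

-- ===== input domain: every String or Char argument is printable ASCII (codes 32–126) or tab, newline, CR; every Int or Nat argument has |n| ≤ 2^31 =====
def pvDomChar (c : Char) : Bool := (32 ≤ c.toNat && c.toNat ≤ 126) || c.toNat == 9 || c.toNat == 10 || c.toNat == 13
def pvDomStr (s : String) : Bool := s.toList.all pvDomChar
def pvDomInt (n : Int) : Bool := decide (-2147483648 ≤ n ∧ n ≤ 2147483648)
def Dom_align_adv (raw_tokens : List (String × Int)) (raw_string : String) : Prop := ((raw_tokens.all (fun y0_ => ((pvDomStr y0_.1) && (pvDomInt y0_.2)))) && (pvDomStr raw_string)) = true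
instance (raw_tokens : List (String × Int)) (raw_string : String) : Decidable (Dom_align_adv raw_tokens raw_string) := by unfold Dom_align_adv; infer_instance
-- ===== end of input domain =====

-- B builds an index (distinct token string -> all its start positions, found once) and binary-searches
-- it per token, instead of A's re-scan of the whole string for every token; same return value.

-- ===== PORT A =====
-- the find-based scan both Pythons contain (A's `findall` generator / B's inline while loop);
-- fuel `s.length + 1` bounds the iterations: each found index strictly increases and is ≤ len(s)
def pvFindScan (s p : String) (i : Int) : Nat → List Int
  | 0 => []
  | fuel + 1 => if i = -1 then [] else i :: pvFindScan s p (PySem.Str.findFrom s p (i + 1)) fuel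

def pvFindall (p s : String) : List Int :=
  pvFindScan s p (PySem.Str.find s p) (s.length + 1)

-- one iteration of A's `for token in raw_tokens` loop; state = (tokens, last_index)
def pvStepA (raw_string : String) (st : List (String × Int × Int × Int) × Int)
    (token : String × Int) : List (String × Int × Int × Int) × Int :=
  let ms := (pvFindall token.1 raw_string).map (fun i =>
    (PySem.Str.slice raw_string (some i) (some ((token.1.length : Int) + i)),
     i, (token.1.length : Int) + i - 1, token.2))
  -- `for match in matches: if match[1] >= last_index: …; break`
  match ms.find? (fun m => decide (m.2.1 ≥ st.2)) with
  | some m => (st.1 ++ [m], m.2.2.1)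
  | none => st

def align_adv (raw_tokens : List (String × Int)) (raw_string : String) :
    List (String × Int × Int × Int) :=
  (raw_tokens.foldl (pvStepA raw_string) ([], 0)).1

-- ===== PORT B =====
-- first loop of B: index = {} ; for token: if token[0] not in index: index[token[0]] = positions
def pvIdxStep (raw_string : String) (d : PySem.Dict String (List Int)) (token : String × Int) :
    PySem.Dict String (List Int) :=
  if d.contains token.1 then d else d.insert token.1 (pvFindall token.1 raw_string)

def pvBuildIndex (raw_tokens : List (String × Int)) (raw_string : String) :
    PySem.Dict String (List Int) :=
  raw_tokens.foldl (pvIdxStep raw_string) PySem.Dict.empty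

-- one iteration of B's second loop; `index[token[0]]` never misses (every token's key was
-- inserted by the first loop, proved below), so the `.getD []` default is never taken
def pvStepB (raw_string : String) (index : PySem.Dict String (List Int))
    (st : List (String × Int × Int × Int) × Int) (token : String × Int) :
    List (String × Int × Int × Int) × Int :=
  let pos := (index.get? token.1).getD []
  let j := PySem.List.bisectLeft pos st.2
  match pos[j]? with
  | some start =>
    let e := start + (token.1.length : Int) - 1
    (st.1 ++ [(PySem.Str.slice raw_string (some start) (some (start + (token.1.length : Int))),
               start, e, token.2)], e)
  | none => st

def align_adv_alt (raw_tokens : List (String × Int)) (raw_string : String) :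
    List (String × Int × Int × Int) :=
  let index := pvBuildIndex raw_tokens raw_string
  (raw_tokens.foldl (pvStepB raw_string index) ([], 0)).1

-- ===== PRECONDITION & SPEC =====
def Spec_align_adv (raw_tokens : List (String × Int)) (raw_string : String) (out : List (String × Int × Int × Int)) : Prop := out = align_adv_alt raw_tokens raw_string
instance (raw_tokens : List (String × Int)) (raw_string : String) (out : List (String × Int × Int × Int)) : Decidable (Spec_align_adv raw_tokens raw_string out) := by unfold Spec_align_adv; infer_instance

-- ===== CLAIM (what is proved, stated in full; the proofs are below) =====
def Claim_equal_align_adv : Prop := ∀ (raw_tokens : List (String × Int)) (raw_string : String), Dom_align_adv raw_tokens raw_string → Spec_align_adv raw_tokens raw_string (align_adv raw_tokens raw_string)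

-- ===== LEMMAS AND PROOFS =====

-- s.find(p, k) = -1 once k is past the end of s
lemma pvFindFrom_of_len_lt (s p : String) (k : Int) (h : (s.toList.length : Int) < k) :
    PySem.Str.findFrom s p k = -1 := by
  rw [PySem.Str.findFrom_eq]
  unfold PySem.Chars.findFrom
  simp only []
  have h0 : ¬ k < 0 := by omega
  rw [if_neg h0, if_pos (by omega)]

-- a successful s.find(p, k) result is ≥ k (for 0 ≤ k)
lemma pvFindFrom_lb (s p : String) (k : Int) (h0 : 0 ≤ k)
    (hne : PySem.Str.findFrom s p k ≠ -1) : k ≤ PySem.Str.findFrom s p k := by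
  by_cases hk : k ≤ (s.toList.length : Int)
  · have hkeq : k = ((k.toNat : Nat) : Int) := by omega
    rw [PySem.Str.findFrom_eq] at hne ⊢
    rw [hkeq] at hne ⊢
    exact (PySem.Chars.findFrom_natCast_spec s.toList p.toList k.toNat (by omega) hne).1
  · exact absurd (pvFindFrom_of_len_lt s p k (by omega)) hne

lemma pvFindScan_neg_one (s p : String) (fuel : Nat) : pvFindScan s p (-1) fuel = [] := by
  cases fuel <;> simp [pvFindScan]

-- every yielded position is ≥ the start index
lemma pvFindScan_lb (s p : String) : ∀ (fuel : Nat) (i x : Int), 0 ≤ i →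
    x ∈ pvFindScan s p i fuel → i ≤ x := by
  intro fuel
  induction fuel with
  | zero => intro i x _ hx; simp [pvFindScan] at hx
  | succ n ih =>
    intro i x h0 hx
    rw [pvFindScan] at hx
    split at hx
    · simp at hx
    · rcases List.mem_cons.mp hx with rfl | hx'
      · exact le_refl x
      · have hne : PySem.Str.findFrom s p (i + 1) ≠ -1 := by
          intro hcon
          rw [hcon, pvFindScan_neg_one] at hx'
          simp at hx'
        have hlb := pvFindFrom_lb s p (i + 1) (by omega) hne
        have := ih (PySem.Str.findFrom s p (i + 1)) x (by omega) hx'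
        omega

-- the scanned positions are weakly sorted
lemma pvFindScan_sorted (s p : String) : ∀ (fuel : Nat) (i : Int), 0 ≤ i ∨ i = -1 →
    (pvFindScan s p i fuel).Pairwise (· ≤ ·) := by
  intro fuel
  induction fuel with
  | zero => intro i _; simp [pvFindScan]
  | succ n ih =>
    intro i hi
    rw [pvFindScan]
    split
    · simp
    · rename_i hne
      have h0 : 0 ≤ i := hi.resolve_right hne
      refine List.pairwise_cons.mpr ⟨?_, ?_⟩
      · intro x hx
        have hne' : PySem.Str.findFrom s p (i + 1) ≠ -1 := by
          intro hcon
          rw [hcon, pvFindScan_neg_one] at hx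
          simp at hx
        have hlb := pvFindFrom_lb s p (i + 1) (by omega) hne'
        have := pvFindScan_lb s p n (PySem.Str.findFrom s p (i + 1)) x (by omega) hx
        omega
      · apply ih
        by_cases hcon : PySem.Str.findFrom s p (i + 1) = -1
        · exact Or.inr hcon
        · exact Or.inl (by have := pvFindFrom_lb s p (i + 1) (by omega) hcon; omega)

lemma pvFindall_sorted (p s : String) : (pvFindall p s).Pairwise (· ≤ ·) := by
  unfold pvFindall
  apply pvFindScan_sorted
  have h := PySem.Chars.neg_one_le_find s.toList p.toList
  rw [PySem.Str.find_eq]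
  omega

-- generic: if everything strictly before index j fails p and everything from j on satisfies p,
-- then find? returns the element at j (none when j = length)
lemma pvFind?_eq_getElem? {α : Type} (p : α → Bool) :
    ∀ (l : List α) (j : Nat), j ≤ l.length →
    (∀ idx (h : idx < l.length), idx < j → p l[idx] = false) →
    (∀ idx (h : idx < l.length), j ≤ idx → p l[idx] = true) →
    l.find? p = l[j]? := by
  intro l
  induction l with
  | nil => intro j hj _ _; simp at hj; simp [hj]
  | cons a t ih =>
    intro j hj hlt hge
    cases j with
    | zero =>
      have := hge 0 (by simp) (by omega)
      simp at this
      simp [List.find?, this]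
    | succ j' =>
      have ha := hlt 0 (by simp) (by omega)
      simp at ha
      rw [List.find?_cons_of_neg (by simp [ha])]
      simp only [List.getElem?_cons_succ]
      apply ih j' (by simpa using hj)
      · intro idx h hidx
        have := hlt (idx + 1) (by simpa using Nat.succ_lt_succ h) (by omega)
        simpa using this
      · intro idx h hidx
        have := hge (idx + 1) (by simpa using Nat.succ_lt_succ h) (by omega)
        simpa using this

-- on a sorted list, B's binary search picks exactly A's first qualifying element
lemma pvFind?_eq_bisect (pos : List Int) (x : Int) (hs : pos.Pairwise (· ≤ ·)) :
    pos.find? (fun i => decide (i ≥ x)) = pos[PySem.List.bisectLeft pos x]? := by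
  obtain ⟨hle, hlt, hge⟩ := PySem.List.bisectLeft_spec pos x hs
  apply pvFind?_eq_getElem? _ pos _ hle
  · intro idx h hidx
    have := hlt idx h hidx
    simp only [ge_iff_le, decide_eq_false_iff_not, not_le]
    omega
  · intro idx h hidx
    have := hge idx h hidx
    simp only [ge_iff_le, decide_eq_true_eq]
    omega

-- the two per-token steps agree whenever the index holds the token's true position list
lemma pvStep_eq (raw_string : String) (index : PySem.Dict String (List Int))
    (token : String × Int)
    (hget : index.get? token.1 = some (pvFindall token.1 raw_string))
    (st : List (String × Int × Int × Int) × Int) :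
    pvStepA raw_string st token = pvStepB raw_string index st token := by
  unfold pvStepA pvStepB
  rw [hget]
  simp only [Option.getD_some]
  rw [List.find?_map]
  have hcomp : ((fun m : String × Int × Int × Int => decide (m.2.1 ≥ st.2)) ∘
      (fun i => (PySem.Str.slice raw_string (some i) (some ((token.1.length : Int) + i)),
        i, (token.1.length : Int) + i - 1, token.2))) = fun i => decide (i ≥ st.2) := by
    funext i; rfl
  rw [hcomp, pvFind?_eq_bisect _ _ (pvFindall_sorted token.1 raw_string)]
  cases h : (pvFindall token.1 raw_string)[PySem.List.bisectLeft (pvFindall token.1 raw_string) st.2]? with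
  | none => simp
  | some start =>
    simp only [Option.map_some]
    have h1 : (token.1.length : Int) + start = start + (token.1.length : Int) := by ring
    simp [h1]

-- soundness of the index build: any stored value is the true position list of its key
lemma pvBuildIndex_sound (raw_string : String) :
    ∀ (ts : List (String × Int)) (d : PySem.Dict String (List Int)),
    (∀ k v, d.get? k = some v → v = pvFindall k raw_string) →
    ∀ k v, (ts.foldl (pvIdxStep raw_string) d).get? k = some v → v = pvFindall k raw_string := by
  intro ts
  induction ts with
  | nil => intro d hd; simpa using hd
  | cons t ts ih =>
    intro d hd
    simp only [List.foldl_cons]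
    apply ih
    intro k v hkv
    unfold pvIdxStep at hkv
    split at hkv
    · exact hd k v hkv
    · rw [PySem.Dict.get?_insert] at hkv
      split at hkv
      · rename_i heq
        subst heq
        injection hkv with hv
        exact hv.symm
      · exact hd k v hkv

lemma pvIdxStep_isSome (raw_string : String) (d : PySem.Dict String (List Int))
    (t : String × Int) (k : String) (h : (d.get? k).isSome) :
    ((pvIdxStep raw_string d t).get? k).isSome := by
  unfold pvIdxStep
  split
  · exact h
  · rw [PySem.Dict.get?_insert]
    split
    · simp
    · exact h

lemma pvBuildIndex_isSome_mono (raw_string : String) :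
    ∀ (ts : List (String × Int)) (d : PySem.Dict String (List Int)) (k : String),
    (d.get? k).isSome → ((ts.foldl (pvIdxStep raw_string) d).get? k).isSome := by
  intro ts
  induction ts with
  | nil => intro d k h; simpa using h
  | cons t ts ih =>
    intro d k h
    simp only [List.foldl_cons]
    exact ih _ k (pvIdxStep_isSome raw_string d t k h)

lemma pvBuildIndex_mem_isSome (raw_string : String) :
    ∀ (ts : List (String × Int)) (d : PySem.Dict String (List Int)) (t : String × Int),
    t ∈ ts → ((ts.foldl (pvIdxStep raw_string) d).get? t.1).isSome := by
  intro ts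
  induction ts with
  | nil => intro d t h; simp at h
  | cons t0 ts ih =>
    intro d t h
    simp only [List.foldl_cons]
    rcases List.mem_cons.mp h with rfl | h'
    · apply pvBuildIndex_isSome_mono
      unfold pvIdxStep
      split
      · rename_i hc
        rw [Option.isSome_iff_ne_none]
        intro hnone
        rw [PySem.Dict.get?_eq_none_iff_contains] at hnone
        simp [hc] at hnone
      · rw [PySem.Dict.get?_insert]
        simp
    · exact ih _ t h'

lemma pvBuildIndex_get (ts : List (String × Int)) (raw_string : String)
    (t : String × Int) (h : t ∈ ts) :
    (pvBuildIndex ts raw_string).get? t.1 = some (pvFindall t.1 raw_string) := by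
  have hsome := pvBuildIndex_mem_isSome raw_string ts PySem.Dict.empty t h
  obtain ⟨v, hv⟩ := Option.isSome_iff_exists.mp hsome
  have hsound := pvBuildIndex_sound raw_string ts PySem.Dict.empty
    (by intro k v hkv; simp [PySem.Dict.get?_empty] at hkv) t.1 v hv
  rw [pvBuildIndex, hv, hsound]

lemma pvFoldl_congr_mem {α β : Type} (l : List α) (f g : β → α → β) (init : β)
    (h : ∀ b, ∀ a ∈ l, f b a = g b a) : l.foldl f init = l.foldl g init := by
  induction l generalizing init with
  | nil => rfl
  | cons a t ih =>
    simp only [List.foldl_cons]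
    rw [h init a (List.mem_cons_self ..)]
    exact ih _ (fun b a' ha' => h b a' (List.mem_cons_of_mem _ ha'))

-- ===== VERDICT (by name: the statement is the Claim_ definition above) =====
theorem align_adv_spec : Claim_equal_align_adv := by
  intro raw_tokens raw_string _
  unfold Spec_align_adv align_adv align_adv_alt
  have h := pvFoldl_congr_mem raw_tokens (pvStepA raw_string)
    (pvStepB raw_string (pvBuildIndex raw_tokens raw_string)) ([], 0)
    (fun st t ht => pvStep_eq raw_string _ t (pvBuildIndex_get raw_tokens raw_string t ht) st)
  rw [h]
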